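-- pv_equiv track=rewrite | github.com/grwna/Tubes-Daspro-K10-D | src/register.py | cekusername
-- ===== SOURCE A (Python) =====
-- def cekusername(username:str) -> bool:
--     stat=True
--     validChars ="abcdefghijklmnopqrstuvwxyzABCDEFGHIJKLMNOPQRSTUVWXYZ0123456789_-"
--     if len(username) == 0 :
--         stat = False
--         return stat
--     for i in username:
--         if i not in validChars :
--             stat=False
--             return stat
--     return stat
-- ===== SOURCE B (Python) =====
-- import re
--
-- def cekusername(username: str) -> bool:
--     return re.fullmatch(r'[A-Za-z0-9_-]+', username) is not None
-- ===== Notes on version B (the rewrite author's own statement) =====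
-- stated objective: idiomatic
-- what changed: Replaces the explicit per-character membership loop over a 64-character literal string with a single anchored regex fullmatch against the character class [A-Za-z0-9_-]+ (the + also covers the empty-string guard).
import Mathlib
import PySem

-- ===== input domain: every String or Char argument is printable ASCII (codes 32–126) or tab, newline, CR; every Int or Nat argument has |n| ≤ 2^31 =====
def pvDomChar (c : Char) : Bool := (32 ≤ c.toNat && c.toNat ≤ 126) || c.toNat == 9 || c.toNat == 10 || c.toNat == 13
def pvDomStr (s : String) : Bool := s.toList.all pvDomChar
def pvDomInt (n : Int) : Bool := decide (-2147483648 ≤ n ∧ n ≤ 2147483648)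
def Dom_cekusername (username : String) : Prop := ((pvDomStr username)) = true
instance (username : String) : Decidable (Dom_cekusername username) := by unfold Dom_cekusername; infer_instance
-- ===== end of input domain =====

-- B replaces A's per-character membership loop over a literal 64-character string with a
-- single anchored regex fullmatch of the character class [A-Za-z0-9_-]+ (idiomatic).

-- ===== PORT A =====
def pvValidChars : List Char := "abcdefghijklmnopqrstuvwxyzABCDEFGHIJKLMNOPQRSTUVWXYZ0123456789_-".toList

-- the 'for i in username' loop with its early return
def cekusernameLoop : List Char → Bool
  | [] => true
  | c :: rest => if (pvValidChars.contains c) = false then false else cekusernameLoop rest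

def cekusername (username : String) : Bool :=
  if PySem.Str.len username = 0 then false else cekusernameLoop username.toList

-- ===== PORT B =====
-- the regex character class [A-Za-z0-9_-], ported as the corresponding range tests
def pvClassChar (c : Char) : Bool :=
  ('A' ≤ c && c ≤ 'Z') || ('a' ≤ c && c ≤ 'z') || ('0' ≤ c && c ≤ '9') || c == '_' || c == '-'

-- re.fullmatch(r'[A-Za-z0-9_-]+', s) is not None: at least one char, all chars in the class
def cekusername_alt (username : String) : Bool :=
  !username.toList.isEmpty && username.toList.all pvClassChar

-- ===== PRECONDITION & SPEC =====
def Spec_cekusername (username : String) (out : Bool) : Prop := out = cekusername_alt username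
instance (username : String) (out : Bool) : Decidable (Spec_cekusername username out) := by unfold Spec_cekusername; infer_instance

-- ===== CLAIM (what is proved, stated in full; the proofs are below) =====
def Claim_equal_cekusername : Prop := ∀ (username : String), Dom_cekusername username → Spec_cekusername username (cekusername username)

-- ===== LEMMAS AND PROOFS =====

-- per-character agreement, checked over all 127 candidate code points
set_option maxRecDepth 4000 in
theorem pvCharCases : ∀ n : Fin 127, pvValidChars.contains (Char.ofNat n.val) = pvClassChar (Char.ofNat n.val) := by decide

theorem pvCharAgree (c : Char) (h : pvDomChar c = true) :
    pvValidChars.contains c = pvClassChar c := by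
  have hlt : c.toNat < 127 := by
    simp [pvDomChar] at h
    omega
  have := pvCharCases ⟨c.toNat, hlt⟩
  simpa [Char.ofNat_toNat] using this

theorem pvLoopEq (l : List Char) (h : l.all pvDomChar = true) :
    cekusernameLoop l = l.all pvClassChar := by
  induction l with
  | nil => rfl
  | cons c rest ih =>
    simp only [List.all_cons, Bool.and_eq_true] at h
    rw [cekusernameLoop, pvCharAgree c h.1]
    cases hc : pvClassChar c <;> simp [hc, ih h.2]

-- ===== VERDICT (by name: the statement is the Claim_ definition above) =====
theorem cekusername_spec : Claim_equal_cekusername := by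
  intro username hdom
  unfold Spec_cekusername cekusername cekusername_alt
  have hdom' : username.toList.all pvDomChar = true := hdom
  rw [PySem.Str.len_eq]
  cases hl : username.toList with
  | nil => simp
  | cons c rest =>
    rw [hl] at hdom'
    simp only [List.length_cons, List.isEmpty_cons]
    have : (↑(rest.length + 1) : Int) ≠ 0 := by positivity
    rw [if_neg this, pvLoopEq _ hdom']
    simp
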